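-- pv_equiv track=rewrite | github.com/asx8678/code_puppy | code_puppy/plugins/shell_safety/regex_classifier.py | _split_compound_command
-- ===== SOURCE A (Python) =====
-- def _split_compound_command(command: str) -> tuple[list[str], bool]:
--     """Split compound shell command into individual sub-commands.
--
--     Uses quote-aware tokenization. Returns (sub_commands, parse_ok).
--     If parse_ok is False, the command had unclosed quotes and should be blocked.
--
--     Args:
--         command: Shell command string to split.
--
--     Returns:
--         Tuple of (list of sub-commands, bool indicating if parsing succeeded).
--     """
--     parts: list[str] = []
--     current: list[str] = []
--     i = 0
--     in_single_quote = False
--     in_double_quote = False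
--
--     while i < len(command):
--         c = command[i]
--
--         if in_single_quote:
--             if c == "'":
--                 in_single_quote = False
--             current.append(c)
--
--         elif in_double_quote:
--             if c == "\\" and i + 1 < len(command):
--                 # Escaped char in double quotes
--                 current.append(c)
--                 current.append(command[i + 1])
--                 i += 2
--                 continue
--             if c == '"':
--                 in_double_quote = False
--             current.append(c)
--
--         else:
--             if c == "'":
--                 in_single_quote = True
--                 current.append(c)
--             elif c == '"':
--                 in_double_quote = True
--                 current.append(c)
--             elif c in ("&", "|") and i + 1 < len(command) and command[i + 1] == c:
--                 # Compound operator && or ||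
--                 part = "".join(current).strip()
--                 if part:
--                     parts.append(part)
--                 current = []
--                 i += 2
--                 continue
--             elif c == ";":
--                 # Command separator
--                 part = "".join(current).strip()
--                 if part:
--                     parts.append(part)
--                 current = []
--             else:
--                 current.append(c)
--
--         i += 1
--
--     # Check for unclosed quotes - fail closed
--     if in_single_quote or in_double_quote:
--         return parts, False
--
--     # Add final part
--     last = "".join(current).strip()
--     if last:
--         parts.append(last)
--
--     return parts if parts else [command.strip()], True
-- ===== SOURCE B (Python) =====
-- def _split_compound_command(command: str) -> tuple[list[str], bool]:
--     """Span-based rewrite: jump from one special position to the next instead of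
--     carrying per-character quote flags; fail-closed early on an unclosed quote."""
--     parts: list[str] = []
--     pieces: list[str] = []  # spans making up the current sub-command
--     i, n = 0, len(command)
--     while i < n:
--         c = command[i]
--         if c == "'":
--             j = command.find("'", i + 1)
--             if j < 0:
--                 return parts, False
--             pieces.append(command[i:j + 1])
--             i = j + 1
--         elif c == '"':
--             j = i + 1
--             while j < n and command[j] != '"':
--                 j += 2 if command[j] == "\\" and j + 1 < n else 1
--             if j >= n:
--                 return parts, False
--             pieces.append(command[i:j + 1])
--             i = j + 1
--         elif c == ";" or (c in "&|" and command[i:i + 2] == c + c):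
--             piece = "".join(pieces).strip()
--             if piece:
--                 parts.append(piece)
--             pieces = []
--             i += 1 if c == ";" else 2
--         else:
--             pieces.append(c)
--             i += 1
--     tail = "".join(pieces).strip()
--     if tail:
--         parts.append(tail)
--     return (parts if parts else [command.strip()], True)
-- ===== Notes on version B (the rewrite author's own statement) =====
-- stated objective: alternative
-- what changed: Replaces A's per-character state machine with two boolean quote flags by a span-based scanner that, at each quote, finds the matching closing quote in one inner scan, appends the whole quoted span at once, and fails closed immediately on an unclosed quote.
import Mathlib
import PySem

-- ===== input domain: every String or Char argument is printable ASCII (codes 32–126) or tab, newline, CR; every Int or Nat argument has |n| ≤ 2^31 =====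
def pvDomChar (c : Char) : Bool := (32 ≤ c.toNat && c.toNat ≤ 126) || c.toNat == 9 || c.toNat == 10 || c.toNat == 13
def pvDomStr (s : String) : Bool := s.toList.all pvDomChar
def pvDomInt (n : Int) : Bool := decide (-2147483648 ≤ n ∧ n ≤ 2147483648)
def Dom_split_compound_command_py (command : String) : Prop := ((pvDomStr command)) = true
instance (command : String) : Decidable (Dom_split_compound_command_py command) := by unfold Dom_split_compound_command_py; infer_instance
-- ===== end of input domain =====

-- B restructures A's per-character quote-flag state machine into a span scanner
-- that jumps to the matching closing quote in one step (objective: alternative).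

-- ===== PORT A =====
-- ''.join(current).strip(); append to parts if non-empty
def pushPartA (parts : List String) (cur : List Char) : List String :=
  let part := PySem.Chars.strip cur
  if part ≠ [] then parts ++ [String.ofList part] else parts

-- the while loop of A: l is the remaining suffix command[i:], cur/parts/flags the loop state
def goA (command : String) (l : List Char) (cur : List Char) (parts : List String)
    (sq dq : Bool) : List String × Bool :=
  match l with
  | [] =>
      if sq || dq then (parts, false)
      else
        let parts := pushPartA parts cur
        (if parts = [] then [PySem.Str.strip command] else parts, true)
  | c :: rest =>
      if sq then
        goA command rest (cur ++ [c]) parts (if c = '\'' then false else sq) dq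
      else if dq then
        if hesc : c = '\\' ∧ rest ≠ [] then
          goA command rest.tail (cur ++ [c, rest.head hesc.2]) parts sq dq
        else
          goA command rest (cur ++ [c]) parts sq (if c = '"' then false else dq)
      else if c = '\'' then goA command rest (cur ++ [c]) parts true dq
      else if c = '"' then goA command rest (cur ++ [c]) parts sq true
      else if (c = '&' ∨ c = '|') ∧ rest.head? = some c then
        goA command rest.tail [] (pushPartA parts cur) sq dq
      else if c = ';' then goA command rest [] (pushPartA parts cur) sq dq
      else goA command rest (cur ++ [c]) parts sq dq
  termination_by l.length
  decreasing_by
    all_goals simp [List.length_tail]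

def split_compound_command_py (command : String) : List String × Bool :=
  goA command command.toList [] [] false false

-- ===== PORT B =====
-- scan for the closing single quote: returns (span up to and including it, remainder)
def sqClose (l : List Char) : Option (List Char × List Char) :=
  match l with
  | [] => none
  | c :: rest =>
      if c = '\'' then some ([c], rest)
      else match sqClose rest with
           | none => none
           | some (sp, r) => some (c :: sp, r)

-- scan for the closing double quote, skipping backslash-escaped characters
def dqClose (l : List Char) : Option (List Char × List Char) :=
  match l with
  | [] => none
  | c :: rest =>
      if c = '"' then some ([c], rest)
      else if c = '\\' then
        match rest with
        | [] => none
        | d :: rest' =>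
            match dqClose rest' with
            | none => none
            | some (sp, r) => some (c :: d :: sp, r)
      else match dqClose rest with
           | none => none
           | some (sp, r) => some (c :: sp, r)

theorem sqClose_length (l : List Char) (sp r : List Char)
    (h : sqClose l = some (sp, r)) : r.length ≤ l.length := by
  induction l generalizing sp r with
  | nil => simp [sqClose] at h
  | cons c rest ih =>
      simp only [sqClose] at h
      split at h
      · simp_all
      · cases hr : sqClose rest with
        | none => simp [hr] at h
        | some p =>
            obtain ⟨sp', r'⟩ := p
            rw [hr] at h
            simp only [Option.some.injEq, Prod.mk.injEq] at h
            have := ih sp' r' hr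
            simp [← h.2]; omega

theorem dqClose_length_aux : ∀ (n : Nat) (l : List Char), l.length ≤ n →
    ∀ (sp r : List Char), dqClose l = some (sp, r) → r.length ≤ l.length := by
  intro n
  induction n with
  | zero =>
      intro l hl sp r h
      have : l = [] := by cases l <;> simp_all
      subst this; simp [dqClose] at h
  | succ n ih =>
      intro l hl sp r h
      match l, h with
      | [], h => simp [dqClose] at h
      | [c], h =>
          simp only [dqClose] at h
          split_ifs at h <;> simp_all
      | c :: d :: rest', h =>
          simp only [dqClose] at h
          split_ifs at h with h2 h1
          · simp_all
          · cases hr : dqClose rest' with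
            | none => simp [hr] at h
            | some p =>
                obtain ⟨sp', r'⟩ := p
                rw [hr] at h
                simp only [Option.some.injEq, Prod.mk.injEq] at h
                have := ih rest' (by simp at hl ⊢; omega) sp' r' hr
                have h2' := h.2
                simp [← h2']
                omega
          · cases hr : dqClose (d :: rest') with
            | none => simp [hr] at h
            | some p =>
                obtain ⟨sp', r'⟩ := p
                rw [hr] at h
                simp only [Option.some.injEq, Prod.mk.injEq] at h
                have := ih (d :: rest') (by simp at hl ⊢; omega) sp' r' hr
                have h2' := h.2
                simp [← h2'] at this ⊢
                omega

theorem dqClose_length (l : List Char) (sp r : List Char)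
    (h : dqClose l = some (sp, r)) : r.length ≤ l.length :=
  dqClose_length_aux l.length l le_rfl sp r h

-- flush the current chunk (''.join(pieces).strip()) into parts if non-empty
def pushPartB (parts : List String) (pieces : List Char) : List String :=
  let piece := PySem.Chars.strip pieces
  if piece ≠ [] then parts ++ [String.ofList piece] else parts

-- B's main scan: jump span by span; fail closed at an unclosed quote
def goB (l : List Char) (pieces : List Char) (parts : List String)
    (command : String) : List String × Bool :=
  match l with
  | [] =>
      let parts := pushPartB parts pieces
      (if parts = [] then [PySem.Str.strip command] else parts, true)
  | c :: rest =>
      if c = '\'' then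
        match hs : sqClose rest with
        | none => (parts, false)
        | some (sp, r) => goB r (pieces ++ c :: sp) parts command
      else if c = '"' then
        match hd : dqClose rest with
        | none => (parts, false)
        | some (sp, r) => goB r (pieces ++ c :: sp) parts command
      else if c = ';' then goB rest [] (pushPartB parts pieces) command
      else if (c = '&' ∨ c = '|') ∧ rest.head? = some c then
        goB rest.tail [] (pushPartB parts pieces) command
      else goB rest (pieces ++ [c]) parts command
  termination_by l.length
  decreasing_by
    · have := sqClose_length rest sp r hs; simp; omega
    · have := dqClose_length rest sp r hd; simp; omega
    · simp
    · simp [List.length_tail]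
    · simp

def split_compound_command_py_alt (command : String) : List String × Bool :=
  goB command.toList [] [] command

-- ===== PRECONDITION & SPEC =====
def Spec_split_compound_command_py (command : String) (out : List String × Bool) : Prop := out = split_compound_command_py_alt command
instance (command : String) (out : List String × Bool) : Decidable (Spec_split_compound_command_py command out) := by unfold Spec_split_compound_command_py; infer_instance

-- ===== CLAIM (what is proved, stated in full; the proofs are below) =====
def Claim_equal_split_compound_command_py : Prop := ∀ (command : String), Dom_split_compound_command_py command → Spec_split_compound_command_py command (split_compound_command_py command)

-- ===== LEMMAS AND PROOFS =====

theorem sqClose_cons (c : Char) (rest : List Char) :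
    sqClose (c :: rest) =
      if c = '\'' then some ([c], rest)
      else match sqClose rest with
           | none => none
           | some (sp, r) => some (c :: sp, r) := by
  cases rest <;> simp [sqClose]

theorem dqClose_cons (c : Char) (rest : List Char) :
    dqClose (c :: rest) =
      if c = '"' then some ([c], rest)
      else if c = '\\' then
        match rest with
        | [] => none
        | d :: rest' =>
            match dqClose rest' with
            | none => none
            | some (sp, r) => some (c :: d :: sp, r)
      else match dqClose rest with
           | none => none
           | some (sp, r) => some (c :: sp, r) := by
  cases rest <;> simp [dqClose]


-- A in single-quote mode consumes exactly a sqClose span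
theorem goA_sq (command : String) (l : List Char) :
    ∀ (cur : List Char) (parts : List String),
      goA command l cur parts true false =
        match sqClose l with
        | none => (parts, false)
        | some (sp, r) => goA command r (cur ++ sp) parts false false := by
  induction l with
  | nil => intro cur parts; rw [goA.eq_def]; simp [sqClose]
  | cons c rest ih =>
      intro cur parts
      by_cases hc : c = '\''
      · rw [goA.eq_def]; simp [sqClose_cons, hc]
      · have step : goA command (c :: rest) cur parts true false
            = goA command rest (cur ++ [c]) parts true false := by
          rw [goA.eq_def]; simp [hc]
        rw [step, ih]
        cases hr : sqClose rest with
        | none => simp [sqClose_cons, hc, hr]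
        | some p => obtain ⟨sp, r⟩ := p; simp [sqClose_cons, hc, hr]

-- A in double-quote mode consumes exactly a dqClose span
theorem goA_dq_aux (command : String) : ∀ (n : Nat) (l : List Char), l.length ≤ n →
    ∀ (cur : List Char) (parts : List String),
      goA command l cur parts false true =
        match dqClose l with
        | none => (parts, false)
        | some (sp, r) => goA command r (cur ++ sp) parts false false := by
  intro n
  induction n with
  | zero =>
      intro l hl cur parts
      have : l = [] := by cases l <;> simp_all
      subst this; rw [goA.eq_def]; simp [dqClose]
  | succ n ih =>
      intro l hl cur parts
      cases l with
      | nil => rw [goA.eq_def]; simp [dqClose]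
      | cons c rest =>
          simp only [List.length_cons] at hl
          by_cases h2 : c = '"'
          · rw [goA.eq_def]; simp [dqClose_cons, h2]
          · by_cases h1 : c = '\\'
            · cases rest with
              | nil =>
                  rw [goA.eq_def]; simp [h1, h2]
                  rw [goA.eq_def]; simp [dqClose_cons, h1, h2]
              | cons d rest' =>
                  have step : goA command (c :: d :: rest') cur parts false true
                      = goA command rest' (cur ++ [c, d]) parts false true := by
                    rw [goA.eq_def]; simp [h1]
                  rw [step, ih rest' (by simp at hl ⊢; omega)]
                  cases hr : dqClose rest' with
                  | none => simp [dqClose_cons, h1, h2, hr]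
                  | some p => obtain ⟨sp, r⟩ := p; simp [dqClose_cons, h1, h2, hr]
            · have step : goA command (c :: rest) cur parts false true
                  = goA command rest (cur ++ [c]) parts false true := by
                rw [goA.eq_def]; simp [h1, h2]
              rw [step, ih rest (by omega)]
              cases hr : dqClose rest with
              | none => simp [dqClose_cons, h1, h2, hr]
              | some p => obtain ⟨sp, r⟩ := p; simp [dqClose_cons, h1, h2, hr]

theorem goA_eq_goB (command : String) :
    ∀ (n : Nat) (l : List Char), l.length ≤ n →
      ∀ (cur : List Char) (parts : List String),
        goA command l cur parts false false = goB l cur parts command := by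
  intro n
  induction n with
  | zero =>
      intro l hl cur parts
      have : l = [] := by cases l <;> simp_all
      subst this
      rw [goA.eq_def, goB.eq_def]
      simp [pushPartA, pushPartB]
  | succ n ih =>
      intro l hl cur parts
      cases l with
      | nil =>
          rw [goA.eq_def, goB.eq_def]
          simp [pushPartA, pushPartB]
      | cons c rest =>
          simp only [List.length_cons] at hl
          by_cases h1 : c = '\''
          · have stepA : goA command (c :: rest) cur parts false false
                = goA command rest (cur ++ [c]) parts true false := by
              rw [goA.eq_def]; simp [h1]
            rw [stepA, goA_sq]
            cases hs : sqClose rest with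
            | none =>
                conv_rhs => rw [goB.eq_def]
                simp only [h1]
                split <;> simp_all
                all_goals (try (split <;> simp_all))
            | some p =>
                obtain ⟨sp, r⟩ := p
                have hlen := sqClose_length rest sp r hs
                simp only []
                rw [ih r (by omega)]
                conv_rhs => rw [goB.eq_def]
                simp only [h1]
                split <;> simp_all
                all_goals (try (split <;> simp_all))
          · by_cases h2 : c = '"'
            · have stepA : goA command (c :: rest) cur parts false false
                  = goA command rest (cur ++ [c]) parts false true := by
                rw [goA.eq_def]; simp [h1, h2]
              rw [stepA, goA_dq_aux command rest.length rest le_rfl]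
              cases hd : dqClose rest with
              | none =>
                  conv_rhs => rw [goB.eq_def]
                  simp only [h1, h2]
                  split <;> simp_all
                  all_goals (try (split <;> simp_all))
              | some p =>
                  obtain ⟨sp, r⟩ := p
                  have hlen := dqClose_length rest sp r hd
                  simp only []
                  rw [ih r (by omega)]
                  conv_rhs => rw [goB.eq_def]
                  simp only [h1, h2]
                  split <;> simp_all
                  all_goals (try (split <;> simp_all))
            · by_cases h3 : (c = '&' ∨ c = '|') ∧ rest.head? = some c
              · have h4 : c ≠ ';' := by rcases h3.1 with h | h <;> rw [h] <;> decide
                have stepA : goA command (c :: rest) cur parts false false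
                    = goA command rest.tail [] (pushPartA parts cur) false false := by
                  rw [goA.eq_def]; simp [h1, h2, h3]
                have stepB : goB (c :: rest) cur parts command
                    = goB rest.tail [] (pushPartB parts cur) command := by
                  rw [goB.eq_def]; simp [h1, h2, h3, h4]
                rw [stepA, stepB, ih rest.tail (by simp [List.length_tail]; omega)]
                simp [pushPartA, pushPartB]
              · by_cases h5 : c = ';'
                · have stepA : goA command (c :: rest) cur parts false false
                      = goA command rest [] (pushPartA parts cur) false false := by
                    rw [goA.eq_def]; simp [h1, h2, h3, h5]
                  have stepB : goB (c :: rest) cur parts command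
                      = goB rest [] (pushPartB parts cur) command := by
                    rw [goB.eq_def]; simp [h1, h2, h5]
                  rw [stepA, stepB, ih rest (by omega)]
                  simp [pushPartA, pushPartB]
                · have stepA : goA command (c :: rest) cur parts false false
                      = goA command rest (cur ++ [c]) parts false false := by
                    rw [goA.eq_def]; simp [h1, h2, h3, h5]
                  have stepB : goB (c :: rest) cur parts command
                      = goB rest (cur ++ [c]) parts command := by
                    rw [goB.eq_def]; simp [h1, h2, h3, h5]
                  rw [stepA, stepB, ih rest (by omega)]

-- ===== VERDICT (by name: the statement is the Claim_ definition above) =====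
theorem split_compound_command_py_spec : Claim_equal_split_compound_command_py := by
  intro command _
  unfold Spec_split_compound_command_py split_compound_command_py split_compound_command_py_alt
  exact goA_eq_goB command command.toList.length command.toList le_rfl [] []
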